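-- pv_equiv track=rewrite | github.com/jojocamilo/Vanzz | case1.py | analyze_containers_by_type
-- ===== SOURCE A (Python) =====
-- def analyze_containers_by_type(fruits_data):
-- # Soal 2: Buah apa saja yang ada di masing-masing wadah (fruitType)?
--     containers = {}
--
--     for fruit in fruits_data:
--         fruit_type = fruit["fruitType"]
--         fruit_name = fruit["fruitName"]
--
--         if fruit_type not in containers:
--             containers[fruit_type] = set()
--
--         containers[fruit_type].add(fruit_name)
--
--     # Convert sets to sorted lists untuk output yang konsisten
--     for fruit_type in containers:
--         containers[fruit_type] = sorted(list(containers[fruit_type]))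
--
--     return containers
-- ===== SOURCE B (Python) =====
-- def analyze_containers_by_type(fruits_data):
--     # One pass: keep each bucket as a sorted, duplicate-free list by inserting
--     # every name at its position (no sets, no separate per-bucket sort pass).
--     containers = {}
--     for fruit in fruits_data:
--         fruit_type = fruit["fruitType"]
--         fruit_name = fruit["fruitName"]
--         names = containers.get(fruit_type)
--         if names is None:
--             containers[fruit_type] = [fruit_name]
--         else:
--             i = 0
--             while i < len(names) and names[i] < fruit_name:
--                 i += 1
--             if i == len(names) or names[i] != fruit_name:
--                 names.insert(i, fruit_name)
--     return containers
-- ===== Notes on version B (the rewrite author's own statement) =====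
-- stated objective: alternative
-- what changed: Replaces the per-type set plus a second sort-every-bucket pass with a single pass that keeps each bucket as a sorted duplicate-free list via in-place linear insertion.
import Mathlib
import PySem

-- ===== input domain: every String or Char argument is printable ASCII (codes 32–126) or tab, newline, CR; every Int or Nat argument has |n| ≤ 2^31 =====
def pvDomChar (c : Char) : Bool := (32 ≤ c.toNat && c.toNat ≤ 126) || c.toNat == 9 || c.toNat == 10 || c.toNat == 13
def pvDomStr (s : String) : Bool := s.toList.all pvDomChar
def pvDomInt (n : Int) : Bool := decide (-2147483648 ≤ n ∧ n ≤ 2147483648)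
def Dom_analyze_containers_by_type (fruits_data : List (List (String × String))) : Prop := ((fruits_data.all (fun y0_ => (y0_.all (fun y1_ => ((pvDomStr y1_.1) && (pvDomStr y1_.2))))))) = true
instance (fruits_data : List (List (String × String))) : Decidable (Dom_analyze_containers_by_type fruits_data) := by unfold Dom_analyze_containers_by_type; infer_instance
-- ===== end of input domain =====

-- B keeps each bucket as a sorted duplicate-free list built by linear insertion (one pass,
-- no sets, no per-bucket sort pass); same return value as A wherever A returns.

-- shared primitive: fruit["k"]; exact under Pre_ (key present), `.getD ""` only totalises
def pvField (fruit : List (String × String)) (k : String) : String :=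
  ((PySem.Dict.mk fruit).get? k).getD ""

-- ===== PORT A =====
def analyze_containers_by_type (fruits_data : List (List (String × String))) : List (String × List String) :=
  -- first loop: containers[fruit_type] is a PySem.Set of names (a Set IS a List)
  let containers : PySem.Dict String (List String) :=
    fruits_data.foldl (fun d fruit =>
      let fruit_type := pvField fruit "fruitType"
      let fruit_name := pvField fruit "fruitName"
      let d := if d.contains fruit_type then d else d.insert fruit_type PySem.Set.empty
      d.insert fruit_type (PySem.Set.add (d.getD fruit_type PySem.Set.empty) fruit_name))
      PySem.Dict.empty
  -- second loop: for fruit_type in containers: containers[fruit_type] = sorted(list(...))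
  let containers :=
    containers.keys.foldl
      (fun d k => d.insert k (PySem.List.sorted (d.getD k []) (fun x => x) false))
      containers
  containers.items

-- ===== PORT B =====
-- the while-loop + conditional list.insert of Source B
def sortedInsertUnique : List String → String → List String
  | [], n => [n]
  | x :: xs, n =>
      if x < n then x :: sortedInsertUnique xs n
      else if x = n then x :: xs
      else n :: x :: xs

def analyze_containers_by_type_alt (fruits_data : List (List (String × String))) : List (String × List String) :=
  (fruits_data.foldl (fun d fruit =>
      let fruit_type := pvField fruit "fruitType"
      let fruit_name := pvField fruit "fruitName"
      match d.get? fruit_type with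
      | none => d.insert fruit_type [fruit_name]
      | some names => d.insert fruit_type (sortedInsertUnique names fruit_name))
    PySem.Dict.empty).items

-- ===== PRECONDITION & SPEC =====
-- Pre_ excludes exactly the inputs on which A raises KeyError: a fruit record missing
-- the "fruitType" or "fruitName" key.
def Pre_analyze_containers_by_type (fruits_data : List (List (String × String))) : Prop :=
  (fruits_data.all (fun fruit =>
    (PySem.Dict.mk fruit).contains "fruitType" && (PySem.Dict.mk fruit).contains "fruitName")) = true

instance (fruits_data : List (List (String × String))) : Decidable (Pre_analyze_containers_by_type fruits_data) := by
  unfold Pre_analyze_containers_by_type; infer_instance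

def pvWitness_analyze_containers_by_type : (List (List (String × String))) :=
  [[("fruitType", "wadah1"), ("fruitName", "apel")],
   [("fruitType", "wadah1"), ("fruitName", "Apel")]]

def Spec_analyze_containers_by_type (fruits_data : List (List (String × String))) (out : List (String × List String)) : Prop := out = analyze_containers_by_type_alt fruits_data
instance (fruits_data : List (List (String × String))) (out : List (String × List String)) : Decidable (Spec_analyze_containers_by_type fruits_data out) := by unfold Spec_analyze_containers_by_type; infer_instance

-- ===== CLAIM (what is proved, stated in full; the proofs are below) =====
def Claim_equal_analyze_containers_by_type : Prop := ∀ (fruits_data : List (List (String × String))), Dom_analyze_containers_by_type fruits_data → Pre_analyze_containers_by_type fruits_data → Spec_analyze_containers_by_type fruits_data (analyze_containers_by_type fruits_data)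

-- ===== LEMMAS AND PROOFS =====

-- the two loop bodies and A's second loop, named for the proofs (definitionally the ports' lambdas)
def stepA (d : PySem.Dict String (List String)) (fruit : List (String × String)) : PySem.Dict String (List String) :=
  let fruit_type := pvField fruit "fruitType"
  let fruit_name := pvField fruit "fruitName"
  let d := if d.contains fruit_type then d else d.insert fruit_type PySem.Set.empty
  d.insert fruit_type (PySem.Set.add (d.getD fruit_type PySem.Set.empty) fruit_name)

def stepB (d : PySem.Dict String (List String)) (fruit : List (String × String)) : PySem.Dict String (List String) :=
  let fruit_type := pvField fruit "fruitType"
  let fruit_name := pvField fruit "fruitName"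
  match d.get? fruit_type with
  | none => d.insert fruit_type [fruit_name]
  | some names => d.insert fruit_type (sortedInsertUnique names fruit_name)

def step2 (d : PySem.Dict String (List String)) (k : String) : PySem.Dict String (List String) :=
  d.insert k (PySem.List.sorted (d.getD k []) (fun x => x) false)

theorem siu_mem {l : List String} {n y : String} (h : y ∈ sortedInsertUnique l n) : y = n ∨ y ∈ l := by
  induction l with
  | nil => simpa [sortedInsertUnique] using h
  | cons x xs ih =>
    simp only [sortedInsertUnique] at h
    split at h
    · rcases List.mem_cons.1 h with h1 | h1
      · exact Or.inr (by simp [h1])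
      · rcases ih h1 with h2 | h2
        · exact Or.inl h2
        · exact Or.inr (by simp [h2])
    · split at h
      · exact Or.inr h
      · rcases List.mem_cons.1 h with h1 | h1
        · exact Or.inl h1
        · exact Or.inr h1

theorem siu_of_mem {l : List String} {n : String} (hp : l.Pairwise (· < ·)) (hm : n ∈ l) :
    sortedInsertUnique l n = l := by
  induction l with
  | nil => cases hm
  | cons x xs ih =>
    obtain ⟨hx, hxs⟩ := List.pairwise_cons.1 hp
    rcases List.mem_cons.1 hm with h1 | h1
    · subst h1
      simp [sortedInsertUnique]
    · have hlt : x < n := hx n h1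
      simp [sortedInsertUnique, hlt, ih hxs h1]

theorem siu_perm {l : List String} {n : String} (hm : n ∉ l) :
    (sortedInsertUnique l n).Perm (n :: l) := by
  induction l with
  | nil => simp [sortedInsertUnique]
  | cons x xs ih =>
    have hnx : ¬ x = n := fun h => hm (by simp [h])
    have hns : n ∉ xs := fun h => hm (List.mem_cons_of_mem _ h)
    by_cases hlt : x < n
    · simp only [sortedInsertUnique, if_pos hlt]
      exact ((ih hns).cons x).trans (List.Perm.swap n x xs)
    · simp [sortedInsertUnique, hlt, hnx]

theorem siu_pairwise {l : List String} {n : String} (hp : l.Pairwise (· < ·)) :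
    (sortedInsertUnique l n).Pairwise (· < ·) := by
  induction l with
  | nil => simp [sortedInsertUnique]
  | cons x xs ih =>
    obtain ⟨hx, hxs⟩ := List.pairwise_cons.1 hp
    by_cases hlt : x < n
    · simp only [sortedInsertUnique, if_pos hlt]
      refine List.pairwise_cons.2 ⟨?_, ih hxs⟩
      intro y hy
      rcases siu_mem hy with h1 | h1
      · exact h1 ▸ hlt
      · exact hx y h1
    · by_cases heq : x = n
      · simpa [sortedInsertUnique, hlt, heq] using hp
      · have hnx : n < x := lt_of_le_of_ne (not_lt.1 hlt) (fun h => heq h.symm)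
        simp only [sortedInsertUnique, if_neg hlt, if_neg heq]
        refine List.pairwise_cons.2 ⟨?_, hp⟩
        intro y hy
        rcases List.mem_cons.1 hy with h1 | h1
        · exact h1 ▸ hnx
        · exact hnx.trans (hx y h1)

theorem pairwise_lt_of_le_nodup {l : List String}
    (hp : l.Pairwise (· ≤ ·)) (hnd : l.Nodup) : l.Pairwise (· < ·) :=
  (hp.and hnd).imp (fun h => lt_of_le_of_ne h.1 h.2)

theorem sorted_set_add (s : List String) (n : String) (hnd : s.Nodup) :
    PySem.List.sorted (PySem.Set.add s n) (fun x => x) false =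
    sortedInsertUnique (PySem.List.sorted s (fun x => x) false) n := by
  have hperm := PySem.List.sorted_perm s (fun x => x) false
  have hle := PySem.List.sorted_pairwise s (fun x => x)
  have hnd' : (PySem.List.sorted s (fun x => x) false).Nodup := hperm.nodup_iff.2 hnd
  have hlt := pairwise_lt_of_le_nodup hle hnd'
  by_cases hm : n ∈ s
  · have hadd : PySem.Set.add s n = s := by
      simp [PySem.Set.add, PySem.Set.contains, hm]
    rw [hadd, siu_of_mem hlt (hperm.mem_iff.2 hm)]
  · have hadd : PySem.Set.add s n = s ++ [n] := by
      simp [PySem.Set.add, PySem.Set.contains, hm]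
    rw [hadd]
    have hns : n ∉ PySem.List.sorted s (fun x => x) false := fun h => hm (hperm.mem_iff.1 h)
    exact PySem.List.sorted_eq_of_perm_of_pairwise_lt _ _ _
      (((siu_perm hns).trans (hperm.cons n)).trans (List.perm_append_singleton n s).symm)
      (siu_pairwise hlt)

theorem nodup_set_add {s : List String} (n : String) (h : s.Nodup) : (PySem.Set.add s n).Nodup := by
  by_cases hm : n ∈ s
  · simpa [PySem.Set.add, PySem.Set.contains, hm] using h
  · simp only [PySem.Set.add, PySem.Set.contains, List.contains_eq_mem, decide_eq_true_eq, hm,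
      if_false, List.nodup_append, List.nodup_singleton]
    exact ⟨h, trivial, fun a ha b hb hab => hm ((hab.trans (List.mem_singleton.1 hb)) ▸ ha)⟩

theorem set_update_self (l s : List String) (h : ∀ x ∈ l, x ∈ s) : PySem.Set.update s l = s := by
  induction l generalizing s with
  | nil => rfl
  | cons x xs ih =>
    have hx : PySem.Set.add s x = s := by
      simp [PySem.Set.add, PySem.Set.contains, h x (by simp)]
    show List.foldl PySem.Set.add (PySem.Set.add s x) xs = s
    rw [hx]
    exact ih s (fun y hy => h y (List.mem_cons_of_mem _ hy))

theorem getD_sortLoop (ks : List String) (d : PySem.Dict String (List String))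
    (hnd : ks.Nodup) (k : String) :
    (ks.foldl step2 d).getD k [] =
      if k ∈ ks then PySem.List.sorted (d.getD k []) (fun x => x) false else d.getD k [] := by
  induction ks generalizing d with
  | nil => simp
  | cons a ks ih =>
    obtain ⟨ha, hnd'⟩ := List.nodup_cons.1 hnd
    rw [List.foldl_cons, ih _ hnd']
    by_cases hk : k ∈ ks
    · have hka : k ≠ a := fun h => ha (h ▸ hk)
      simp [step2, hk, hka, PySem.Dict.getD_insert, List.mem_cons]
    · by_cases hka : k = a
      · subst hka
        simp [step2, hk, PySem.Dict.getD_insert_self]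
      · simp [step2, hk, hka, PySem.Dict.getD_insert, List.mem_cons]

theorem loop_inv (fruits : List (List (String × String))) (dA dB : PySem.Dict String (List String))
    (hkeys : dA.keys = dB.keys) (hnd : dA.keys.Nodup)
    (hvnd : ∀ k, (dA.getD k []).Nodup)
    (hrel : ∀ k, PySem.List.sorted (dA.getD k []) (fun x => x) false = dB.getD k []) :
    (fruits.foldl stepA dA).keys = (fruits.foldl stepB dB).keys ∧
    (fruits.foldl stepA dA).keys.Nodup ∧
    (∀ k, ((fruits.foldl stepA dA).getD k []).Nodup) ∧
    (∀ k, PySem.List.sorted ((fruits.foldl stepA dA).getD k []) (fun x => x) false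
            = (fruits.foldl stepB dB).getD k []) := by
  induction fruits generalizing dA dB with
  | nil => exact ⟨hkeys, hnd, hvnd, hrel⟩
  | cons fruit rest ih =>
    rw [List.foldl_cons, List.foldl_cons]
    have hcont : dB.contains (pvField fruit "fruitType") = dA.contains (pvField fruit "fruitType") := by
      simp [PySem.Dict.contains_eq_decide_mem_keys, hkeys]
    by_cases hc : dA.contains (pvField fruit "fruitType") = true
    · -- the type is already a key in both dicts
      have hA : stepA dA fruit
          = dA.insert (pvField fruit "fruitType")
              (PySem.Set.add (dA.getD (pvField fruit "fruitType") []) (pvField fruit "fruitName")) := by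
        simp [stepA, hc, PySem.Set.empty]
      obtain ⟨v, hv⟩ : ∃ v, dB.get? (pvField fruit "fruitType") = some v := by
        have hb : dB.contains (pvField fruit "fruitType") = true := hcont.trans hc
        rw [PySem.Dict.contains_eq_isSome_get?] at hb
        exact Option.isSome_iff_exists.1 hb
      have hB : stepB dB fruit
          = dB.insert (pvField fruit "fruitType") (sortedInsertUnique v (pvField fruit "fruitName")) := by
        simp [stepB, hv]
      have hvval : v = dB.getD (pvField fruit "fruitType") [] :=
        (PySem.Dict.getD_of_get?_eq_some dB [] hv).symm
      rw [hA, hB]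
      apply ih
      · rw [PySem.Dict.keys_insert_of_contains _ _ hc,
            PySem.Dict.keys_insert_of_contains _ _ (hcont.trans hc), hkeys]
      · exact PySem.Dict.nodup_keys_insert _ _ _ hnd
      · intro k
        rw [PySem.Dict.getD_insert]
        split
        · exact nodup_set_add _ (hvnd _)
        · exact hvnd k
      · intro k
        rw [PySem.Dict.getD_insert, PySem.Dict.getD_insert]
        by_cases hk : k = pvField fruit "fruitType"
        · rw [if_pos hk, if_pos hk, sorted_set_add _ _ (hvnd _), hrel _, ← hvval]
        · rw [if_neg hk, if_neg hk]
          exact hrel k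
    · -- a fresh type: both sides insert a fresh singleton bucket
      have hc' : dA.contains (pvField fruit "fruitType") = false := by
        simpa using hc
      have hA : stepA dA fruit = dA.insert (pvField fruit "fruitType") [pvField fruit "fruitName"] := by
        simp [stepA, hc', PySem.Dict.getD_insert_self, PySem.Set.add, PySem.Set.empty,
              PySem.Set.contains, PySem.Dict.insert_insert_self]
      have hB : stepB dB fruit = dB.insert (pvField fruit "fruitType") [pvField fruit "fruitName"] := by
        have hn : dB.get? (pvField fruit "fruitType") = none :=
          (PySem.Dict.get?_eq_none_iff_contains dB _).2 (hcont.trans hc')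
        simp [stepB, hn]
      rw [hA, hB]
      apply ih
      · rw [PySem.Dict.keys_insert_of_not_contains _ _ hc',
            PySem.Dict.keys_insert_of_not_contains _ _ (hcont.trans hc'), hkeys]
      · exact PySem.Dict.nodup_keys_insert _ _ _ hnd
      · intro k
        rw [PySem.Dict.getD_insert]
        split
        · exact List.nodup_singleton _
        · exact hvnd k
      · intro k
        rw [PySem.Dict.getD_insert, PySem.Dict.getD_insert]
        by_cases hk : k = pvField fruit "fruitType"
        · rw [if_pos hk, if_pos hk]
          exact PySem.List.sorted_eq_of_perm_of_pairwise_lt _ _ _ (List.Perm.refl _) (by simp)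
        · rw [if_neg hk, if_neg hk]
          exact hrel k

theorem ports_eq (fd : List (List (String × String))) :
    analyze_containers_by_type fd = analyze_containers_by_type_alt fd := by
  obtain ⟨hkeys, hnd, hvnd, hrel⟩ :=
    loop_inv fd PySem.Dict.empty PySem.Dict.empty rfl PySem.Dict.nodup_keys_empty
      (fun k => by simp [PySem.Dict.getD_empty])
      (fun k => by simp [PySem.Dict.getD_empty]; rfl)
  show ((fd.foldl stepA PySem.Dict.empty).keys.foldl step2 (fd.foldl stepA PySem.Dict.empty)).items
      = (fd.foldl stepB PySem.Dict.empty).items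
  have hkeys2 : ((fd.foldl stepA PySem.Dict.empty).keys.foldl step2 (fd.foldl stepA PySem.Dict.empty)).keys
      = (fd.foldl stepA PySem.Dict.empty).keys := by
    have := PySem.Dict.keys_foldl_insert (fd.foldl stepA PySem.Dict.empty).keys
      (fun d k => PySem.List.sorted (d.getD k []) (fun x => x) false) (fd.foldl stepA PySem.Dict.empty)
    rw [show (fun (d : PySem.Dict String (List String)) (x : String) =>
          d.insert x (PySem.List.sorted (d.getD x []) (fun x => x) false)) = step2 from rfl] at this
    rw [this]
    exact set_update_self _ _ (fun x hx => hx)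
  rw [PySem.Dict.items_eq_map_keys _ (by rw [hkeys2]; exact hnd) ([] : List String),
      PySem.Dict.items_eq_map_keys _ (by rw [← hkeys]; exact hnd) ([] : List String), hkeys2, ← hkeys]
  apply List.map_congr_left
  intro k hk
  rw [getD_sortLoop _ _ hnd, if_pos hk, hrel k]

-- ===== VERDICT (by name: the statement is the Claim_ definition above) =====
theorem analyze_containers_by_type_spec : Claim_equal_analyze_containers_by_type := by
  intro fd _ _
  exact ports_eq fd
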